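-- pv_equiv track=rewrite | github.com/sharif1093/py_floor_plan_segmenter | py_floor_plan_segmenter/over_segment.py | find_lifespans
-- ===== SOURCE A (Python) =====
-- from typing import List, Dict
--
-- def find_lifespans(mappers: List):
--     lifespan = {}
--
--     for index in range(len(mappers)-1, -1, -1):
--         mapper = mappers[index]
--         for m in mapper:
--             key = mapper[m]
--
--             if not key in lifespan:
--                 # Process lifespan end
--                 lifespan[key] = [index, index]
--
--             # Process lifespan start
--             lifespan[key][0] = index
--
--     return lifespan
-- ===== SOURCE B (Python) =====
-- def find_lifespans(mappers):
--     n = len(mappers)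
--     occ = {}
--     for i, mapper in enumerate(reversed(mappers)):
--         index = n - 1 - i
--         for v in mapper.values():
--             occ.setdefault(v, []).append(index)
--     return {k: [min(ix), max(ix)] for k, ix in occ.items()}
-- ===== Notes on version B (the rewrite author's own statement) =====
-- stated objective: alternative
-- what changed: B replaces A's in-place running [start,end] pair per key by a two-phase grouping: it collects the full occurrence-index list per key (setdefault/append) and then reduces each list with min/max in a second pass.
import Mathlib
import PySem

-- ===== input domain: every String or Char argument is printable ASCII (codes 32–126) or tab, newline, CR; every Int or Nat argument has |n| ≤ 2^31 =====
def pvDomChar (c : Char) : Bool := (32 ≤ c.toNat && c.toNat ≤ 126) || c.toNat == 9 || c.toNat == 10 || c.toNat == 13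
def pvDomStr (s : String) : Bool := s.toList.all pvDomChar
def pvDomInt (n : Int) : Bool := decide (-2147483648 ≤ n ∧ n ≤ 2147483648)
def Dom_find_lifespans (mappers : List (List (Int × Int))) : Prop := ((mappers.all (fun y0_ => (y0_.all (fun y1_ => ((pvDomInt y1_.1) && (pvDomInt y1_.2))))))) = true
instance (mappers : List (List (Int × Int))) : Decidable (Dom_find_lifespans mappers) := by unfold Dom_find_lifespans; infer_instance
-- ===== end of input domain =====

-- B regroups the work into two phases (collect per-key occurrence-index lists, then reduce each list with min/max)
-- instead of A's running [start, end] pair updated in place; objective: alternative decomposition, same cost.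


-- ===== PORT A =====
def find_lifespans (mappers : List (List (Int × Int))) : List (Int × List Int) :=
  ((PySem.List.pyRange (PySem.List.len mappers - 1) (-1) (-1)).foldl
      (fun lifespan index =>
        let mapper := PySem.List.pyGetD mappers index []
        mapper.foldl
          (fun lifespan m =>
            let key := PySem.Dict.getD (PySem.Dict.mk mapper) m.1 0
            let lifespan :=
              if lifespan.contains key then lifespan
              else lifespan.insert key [index, index]
            lifespan.modify key [] (fun l => l.set 0 index))
          lifespan)
      (PySem.Dict.empty : PySem.Dict Int (List Int))).items

-- ===== PORT B =====
def find_lifespans_alt (mappers : List (List (Int × Int))) : List (Int × List Int) :=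
  ((PySem.List.enumerate mappers.reverse).foldl
      (fun occ p =>
        let index := PySem.List.len mappers - 1 - p.1
        (p.2.map (fun kv => kv.2)).foldl
          (fun occ v => occ.modify v [] (fun l => l ++ [index]))
          occ)
      (PySem.Dict.empty : PySem.Dict Int (List Int))).items.map (fun p =>
    (p.1, [(PySem.List.min? p.2 (fun y => y)).getD 0,
           (PySem.List.max? p.2 (fun y => y)).getD 0]))

-- ===== PRECONDITION & SPEC =====
-- Pre_ excludes association lists containing a duplicated key inside one mapper: a Python dict cannot
-- hold duplicate keys, so no Python input corresponds to such a list (A is total on actual dict inputs).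
def Pre_find_lifespans (mappers : List (List (Int × Int))) : Prop :=
  ∀ mapper ∈ mappers, (mapper.map Prod.fst).Nodup
instance (mappers : List (List (Int × Int))) : Decidable (Pre_find_lifespans mappers) := by
  unfold Pre_find_lifespans; infer_instance
def pvWitness_find_lifespans : (List (List (Int × Int))) := [[(1, 2), (2, 2)], [(1, 3)]]

def Spec_find_lifespans (mappers : List (List (Int × Int))) (out : List (Int × List Int)) : Prop := out = find_lifespans_alt mappers
instance (mappers : List (List (Int × Int))) (out : List (Int × List Int)) : Decidable (Spec_find_lifespans mappers out) := by unfold Spec_find_lifespans; infer_instance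

-- ===== CLAIM (what is proved, stated in full; the proofs are below) =====
def Claim_equal_find_lifespans : Prop := ∀ (mappers : List (List (Int × Int))), Dom_find_lifespans mappers → Pre_find_lifespans mappers → Spec_find_lifespans mappers (find_lifespans mappers)

-- ===== LEMMAS AND PROOFS =====

-- the per-entry abstraction: an occurrence list (built back-to-front, so nonincreasing) to A's [start, end] pair
def pvG (p : Int × List Int) : Int × List Int := (p.1, [p.2.getLast?.getD 0, p.2.head?.getD 0])

def pvMap (d : PySem.Dict Int (List Int)) : PySem.Dict Int (List Int) := PySem.Dict.mk (d.items.map pvG)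

def pvStepA (index : Int) (d : PySem.Dict Int (List Int)) (v : Int) : PySem.Dict Int (List Int) :=
  (if d.contains v then d else d.insert v [index, index]).modify v [] (fun l => l.set 0 index)

def pvStepB (index : Int) (d : PySem.Dict Int (List Int)) (v : Int) : PySem.Dict Int (List Int) :=
  d.modify v [] (fun l => l ++ [index])

def pvInv (index : Int) (d : PySem.Dict Int (List Int)) : Prop :=
  ∀ p ∈ d.items, p.2 ≠ [] ∧ p.2.Pairwise (· ≥ ·) ∧ ∀ x ∈ p.2, index ≤ x

def pvRunA (s : List (Int × List Int)) (d : PySem.Dict Int (List Int)) : PySem.Dict Int (List Int) :=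
  s.foldl (fun d q => q.2.foldl (pvStepA q.1) d) d

def pvRunB (s : List (Int × List Int)) (d : PySem.Dict Int (List Int)) : PySem.Dict Int (List Int) :=
  s.foldl (fun d q => q.2.foldl (pvStepB q.1) d) d

def pvStreamElt (mappers : List (List (Int × Int))) (k : Nat) : Int × List Int :=
  ((mappers.length : Int) - 1 - (k : Int),
   (mappers.getD (mappers.length - 1 - k) []).map (fun kv => kv.2))

def pvStream (mappers : List (List (Int × Int))) : List (Int × List Int) :=
  (List.range mappers.length).map (pvStreamElt mappers)

lemma pvContains_map (d : PySem.Dict Int (List Int)) (v : Int) :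
    (pvMap d).contains v = d.contains v := by
  simp only [pvMap, PySem.Dict.contains, List.any_map]
  rfl

lemma pvFind?_map (d : PySem.Dict Int (List Int)) (v : Int) :
    (pvMap d).items.find? (fun p => p.1 == v)
      = ((d.items.find? (fun p => p.1 == v)).map pvG) := by
  simp only [pvMap]
  rw [List.find?_map]
  rfl

lemma pvStep_rel (index v : Int) (d : PySem.Dict Int (List Int)) (h : pvInv index d) :
    pvStepA index (pvMap d) v = pvMap (pvStepB index d v) := by
  unfold pvStepA pvStepB
  rw [pvContains_map]
  by_cases hc : d.contains v = true
  · -- key already present: both sides replace the entry in place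
    obtain ⟨pr, hfind⟩ : ∃ pr, d.items.find? (fun p => p.1 == v) = some pr := by
      have h1 : ∃ x ∈ d.items, (x.1 == v) = true := by
        simpa [PySem.Dict.contains, List.any_eq_true] using hc
      exact Option.isSome_iff_exists.mp (List.find?_isSome.mpr h1)
    have hprmem : pr ∈ d.items := List.mem_of_find?_eq_some hfind
    have hpr := h pr hprmem
    obtain ⟨x, t, hx⟩ : ∃ x t, pr.2 = x :: t := by
      cases hpx : pr.2 with
      | nil => exact absurd hpx hpr.1
      | cons a b => exact ⟨a, b, rfl⟩
    simp only [if_pos hc]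
    have hcA : (pvMap d).contains v = true := by rw [pvContains_map]; exact hc
    have hgetB : d.getD v [] = pr.2 := by
      simp [PySem.Dict.getD, PySem.Dict.get?, hfind]
    have hgetA : (pvMap d).getD v [] = [pr.2.getLast?.getD 0, pr.2.head?.getD 0] := by
      simp [PySem.Dict.getD, PySem.Dict.get?, pvFind?_map, hfind, pvG]
    show (pvMap d).insert v (((pvMap d).getD v []).set 0 index)
        = pvMap (d.insert v ((d.getD v []) ++ [index]))
    rw [hgetA, hgetB]
    apply PySem.Dict.ext
    simp only [PySem.Dict.insert]
    rw [if_pos hcA, if_pos hc]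
    simp only [pvMap, List.map_map]
    apply List.map_congr_left
    intro p hp
    by_cases hpv : (p.1 == v) = true
    · have h2 : (x :: (t ++ [index])).getLast?.getD 0 = index := by
        rw [show (x :: (t ++ [index])) = (x :: t) ++ [index] from rfl, List.getLast?_concat]
        rfl
      simp [Function.comp, pvG, hpv, hx, List.set_cons_zero, h2]
    · simp [Function.comp, pvG, hpv]
  · -- new key: both sides append the new entry at the end
    simp only [if_neg hc]
    have hkeys : ∀ p ∈ d.items, (p.1 == v) = false := by
      intro p hp
      cases hb : (p.1 == v) with
      | false => rfl
      | true =>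
        exfalso
        apply hc
        simp only [PySem.Dict.contains, List.any_eq_true]
        exact ⟨p, hp, hb⟩
    have hfind : d.items.find? (fun p => p.1 == v) = none :=
      List.find?_eq_none.mpr (fun p hp => by simp [hkeys p hp])
    have hgetB : d.getD v [] = [] := by
      simp [PySem.Dict.getD, PySem.Dict.get?, hfind]
    have hcA : (pvMap d).contains v = false := by
      rw [pvContains_map]
      cases hcb : d.contains v with
      | true => exact absurd hcb hc
      | false => rfl
    have hins1 : (pvMap d).insert v [index, index]
        = PySem.Dict.mk (d.items.map pvG ++ [(v, [index, index])]) := by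
      rw [PySem.Dict.insert, if_neg (by rw [hcA]; simp)]
      rfl
    have hgetA : ((pvMap d).insert v [index, index]).getD v [] = [index, index] :=
      PySem.Dict.getD_insert_self _ _ _ _
    show ((pvMap d).insert v [index, index]).insert v
          ((((pvMap d).insert v [index, index]).getD v []).set 0 index)
        = pvMap (d.insert v ((d.getD v []) ++ [index]))
    rw [hgetA, List.set_cons_zero, hins1, hgetB]
    have hc2 : (PySem.Dict.mk (d.items.map pvG ++ [(v, [index, index])])).contains v = true := by
      simp [PySem.Dict.contains]
    have hB : d.insert v (([] : List Int) ++ [index]) = PySem.Dict.mk (d.items ++ [(v, [index])]) := by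
      rw [PySem.Dict.insert, if_neg hc]
      rfl
    rw [hB]
    apply PySem.Dict.ext
    rw [PySem.Dict.insert, if_pos hc2]
    show (d.items.map pvG ++ [(v, [index, index])]).map
          (fun p => if (p.1 == v) = true then (v, [index, index]) else p)
        = (d.items ++ [(v, [index])]).map pvG
    rw [List.map_append, List.map_append]
    congr 1
    · rw [List.map_map]
      apply List.map_congr_left
      intro p hp
      simp [Function.comp, pvG, hkeys p hp]
    · simp [pvG]

lemma pvInv_stepB (index v : Int) (d : PySem.Dict Int (List Int)) (h : pvInv index d) :
    pvInv index (pvStepB index d v) := by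
  unfold pvStepB
  show pvInv index (d.insert v ((d.getD v []) ++ [index]))
  by_cases hc : d.contains v = true
  · obtain ⟨pr, hfind⟩ : ∃ pr, d.items.find? (fun p => p.1 == v) = some pr := by
      have h1 : ∃ x ∈ d.items, (x.1 == v) = true := by
        simpa [PySem.Dict.contains, List.any_eq_true] using hc
      exact Option.isSome_iff_exists.mp (List.find?_isSome.mpr h1)
    have hprmem : pr ∈ d.items := List.mem_of_find?_eq_some hfind
    have hpr := h pr hprmem
    have hgetB : d.getD v [] = pr.2 := by
      simp [PySem.Dict.getD, PySem.Dict.get?, hfind]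
    rw [hgetB]
    intro q hq
    have : q ∈ (d.insert v (pr.2 ++ [index])).items := hq
    rw [PySem.Dict.insert] at this
    rw [if_pos hc] at this
    obtain ⟨p, hp, hpq⟩ := List.mem_map.mp this
    have hgood : pr.2 ≠ [] ∧ (pr.2 ++ [index]).Pairwise (· ≥ ·) ∧ ∀ x ∈ pr.2 ++ [index], index ≤ x := by
      refine ⟨hpr.1, ?_, ?_⟩
      · rw [List.pairwise_append]
        exact ⟨hpr.2.1, List.pairwise_singleton _ _,
          fun a ha b hb => by simp at hb; subst hb; exact hpr.2.2 a ha⟩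
      · intro x hx
        rcases List.mem_append.mp hx with hx | hx
        · exact hpr.2.2 x hx
        · simp at hx; omega
    by_cases hpv : (p.1 == v) = true
    · rw [if_pos hpv] at hpq
      subst hpq
      exact ⟨by simp, hgood.2.1, hgood.2.2⟩
    · rw [if_neg hpv] at hpq
      subst hpq
      exact h p hp
  · have hkeys : ∀ p ∈ d.items, (p.1 == v) = false := by
      intro p hp
      cases hb : (p.1 == v) with
      | false => rfl
      | true =>
        exfalso
        apply hc
        simp only [PySem.Dict.contains, List.any_eq_true]
        exact ⟨p, hp, hb⟩
    have hfind : d.items.find? (fun p => p.1 == v) = none :=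
      List.find?_eq_none.mpr (fun p hp => by simp [hkeys p hp])
    have hgetB : d.getD v [] = [] := by
      simp [PySem.Dict.getD, PySem.Dict.get?, hfind]
    rw [hgetB]
    intro q hq
    have : q ∈ (d.insert v ([] ++ [index])).items := hq
    rw [PySem.Dict.insert] at this
    rw [if_neg hc] at this
    rcases List.mem_append.mp this with hm | hm
    · exact h q hm
    · simp at hm
      subst hm
      exact ⟨by simp, by simp, by intro x hx; simp at hx; omega⟩

lemma pvInner_rel (index : Int) (vs : List Int) (d : PySem.Dict Int (List Int)) (h : pvInv index d) :
    vs.foldl (pvStepA index) (pvMap d) = pvMap (vs.foldl (pvStepB index) d)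
      ∧ pvInv index (vs.foldl (pvStepB index) d) := by
  induction vs generalizing d with
  | nil => exact ⟨rfl, h⟩
  | cons x t ih =>
    simp only [List.foldl_cons]
    rw [pvStep_rel index x d h]
    exact ih _ (pvInv_stepB index x d h)

lemma pvRun_rel (s : List (Int × List Int)) (d : PySem.Dict Int (List Int))
    (hs : (s.map Prod.fst).Pairwise (· ≥ ·))
    (h : ∀ p ∈ d.items, p.2 ≠ [] ∧ p.2.Pairwise (· ≥ ·) ∧ ∀ i ∈ s.map Prod.fst, ∀ x ∈ p.2, i ≤ x) :
    pvRunA s (pvMap d) = pvMap (pvRunB s d)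
      ∧ ∀ p ∈ (pvRunB s d).items, p.2 ≠ [] ∧ p.2.Pairwise (· ≥ ·) := by
  induction s generalizing d with
  | nil => exact ⟨rfl, fun p hp => ⟨(h p hp).1, (h p hp).2.1⟩⟩
  | cons q t ih =>
    rw [List.map_cons, List.pairwise_cons] at hs
    have hinv : pvInv q.1 d := by
      intro p hp
      exact ⟨(h p hp).1, (h p hp).2.1, (h p hp).2.2 q.1 (by simp)⟩
    have hin := pvInner_rel q.1 q.2 d hinv
    unfold pvRunA pvRunB
    rw [List.foldl_cons, List.foldl_cons]
    have hA : List.foldl (pvStepA q.1) (pvMap d) q.2 = pvMap (List.foldl (pvStepB q.1) d q.2) := hin.1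
    rw [hA]
    exact ih _ hs.2 (by
      intro p hp
      refine ⟨(hin.2 p hp).1, (hin.2 p hp).2.1, ?_⟩
      intro i hi x hx
      have h1 : q.1 ≥ i := hs.1 i hi
      have h2 : q.1 ≤ x := (hin.2 p hp).2.2 x hx
      omega)

lemma pvKey (mapper : List (Int × Int)) (m : Int × Int) (hm : m ∈ mapper)
    (hnd : (mapper.map Prod.fst).Nodup) :
    PySem.Dict.getD (PySem.Dict.mk mapper) m.1 0 = m.2 := by
  induction mapper with
  | nil => cases hm
  | cons a t ih =>
    simp only [List.map_cons, List.nodup_cons] at hnd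
    by_cases hb : (a.1 == m.1) = true
    · have ha : a.1 = m.1 := by simpa using hb
      rcases List.mem_cons.1 hm with rfl | hmt
      · simp [PySem.Dict.getD, PySem.Dict.get?]
      · exact absurd (by rw [ha]; exact List.mem_map_of_mem hmt) hnd.1
    · have hmt : m ∈ t := by
        rcases List.mem_cons.1 hm with rfl | hmt
        · simp at hb
        · exact hmt
      have hstep : PySem.Dict.getD (PySem.Dict.mk (a :: t)) m.1 0
          = PySem.Dict.getD (PySem.Dict.mk t) m.1 0 := by
        simp [PySem.Dict.getD, PySem.Dict.get?, hb]
      rw [hstep]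
      exact ih hmt hnd.2

lemma pvMap_empty : pvMap PySem.Dict.empty = PySem.Dict.empty := by
  simp [pvMap, PySem.Dict.empty]

lemma pvA_loop (mappers : List (List (Int × Int))) (hpre : Pre_find_lifespans mappers) :
    find_lifespans mappers = (pvRunA (pvStream mappers) (pvMap PySem.Dict.empty)).items := by
  rw [pvMap_empty]
  unfold find_lifespans pvRunA pvStream
  rw [PySem.List.pyRange_neg_one]
  have h1 : (PySem.List.len mappers - 1 - (-1)).toNat = mappers.length := by
    simp [PySem.List.len]
  rw [h1, List.foldl_map, List.foldl_map]
  congr 1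
  apply PySem.List.foldl_congr_mem
  intro acc k hk
  have hk' : k < mappers.length := List.mem_range.mp hk
  have hidx : PySem.List.len mappers - 1 - (k : Int) = (mappers.length : Int) - 1 - (k : Int) := by
    simp [PySem.List.len]
  rw [hidx]
  have hget : PySem.List.pyGetD mappers ((mappers.length : Int) - 1 - (k : Int)) []
      = mappers.getD (mappers.length - 1 - k) [] := by
    rw [PySem.List.pyGetD_of_nonneg _ _ (by omega)]
    congr 1
    omega
  rw [hget]
  have hmem : mappers.getD (mappers.length - 1 - k) [] ∈ mappers := by
    rw [List.getD_eq_getElem _ _ (by omega)]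
    exact List.getElem_mem _
  have hnd := hpre _ hmem
  simp only [pvStreamElt, List.foldl_map]
  apply PySem.List.foldl_congr_mem
  intro acc2 m hm
  rw [pvKey _ m hm hnd]
  rfl

lemma pvB_loop (mappers : List (List (Int × Int))) :
    find_lifespans_alt mappers =
      ((pvRunB (pvStream mappers) PySem.Dict.empty).items).map (fun p =>
        (p.1, [(PySem.List.min? p.2 (fun y => y)).getD 0,
               (PySem.List.max? p.2 (fun y => y)).getD 0])) := by
  unfold find_lifespans_alt pvRunB pvStream
  rw [PySem.List.enumerate_eq_map_pyRange mappers.reverse []]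
  rw [PySem.List.pyRange_one]
  have h1 : (PySem.List.len mappers.reverse - 0).toNat = mappers.length := by
    simp [PySem.List.len]
  rw [h1, List.foldl_map, List.foldl_map, List.foldl_map]
  congr 2
  apply PySem.List.foldl_congr_mem
  intro acc k hk
  have hk' : k < mappers.length := List.mem_range.mp hk
  have hidx : PySem.List.len mappers - 1 - ((0 : Int) + (k : Int)) = (mappers.length : Int) - 1 - (k : Int) := by
    simp [PySem.List.len]
  have hget : PySem.List.pyGetD mappers.reverse ((0 : Int) + (k : Int)) []
      = mappers.getD (mappers.length - 1 - k) [] := by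
    rw [show ((0 : Int) + (k : Int)) = ((k : Nat) : Int) by omega]
    rw [PySem.List.pyGetD_natCast]
    rw [List.getD_eq_getElem _ _ (by simpa using hk'),
        List.getD_eq_getElem _ _ (by omega)]
    simp [List.getElem_reverse]
  simp only [pvStreamElt, hidx, hget]
  rfl

lemma pvFoldlMin (t : List Int) (x : Int) (h : (x :: t).Pairwise (· ≥ ·)) :
    t.foldl min x = (x :: t).getLast (by simp) := by
  induction t generalizing x with
  | nil => simp
  | cons y t ih =>
    have hxy : x ≥ y := (List.pairwise_cons.1 h).1 y (by simp)
    have h' : (y :: t).Pairwise (· ≥ ·) := (List.pairwise_cons.1 h).2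
    simp only [List.foldl_cons]
    rw [min_eq_right hxy]
    rw [ih y h']
    simp

lemma pvFoldlMax (t : List Int) (x : Int) (h : ∀ y ∈ t, y ≤ x) : t.foldl max x = x := by
  induction t with
  | nil => rfl
  | cons y t ih =>
    simp only [List.foldl_cons]
    rw [max_eq_left (h y (by simp))]
    exact ih (fun z hz => h z (by simp [hz]))

lemma pvFinal (p : Int × List Int) (hne : p.2 ≠ []) (hp : p.2.Pairwise (· ≥ ·)) :
    (p.1, [(PySem.List.min? p.2 (fun y => y)).getD 0,
           (PySem.List.max? p.2 (fun y => y)).getD 0]) = pvG p := by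
  obtain ⟨k, l⟩ := p
  cases l with
  | nil => exact absurd rfl hne
  | cons x t =>
    simp only [pvG]
    rw [PySem.List.min?_id_cons, PySem.List.max?_id_cons]
    have hle : ∀ y ∈ t, y ≤ x := by
      intro y hy
      exact (List.pairwise_cons.1 hp).1 y hy
    rw [pvFoldlMax t x hle, pvFoldlMin t x hp]
    simp [List.getLast?_eq_some_getLast]

lemma pvStream_pairwise (mappers : List (List (Int × Int))) :
    ((pvStream mappers).map Prod.fst).Pairwise (· ≥ ·) := by
  unfold pvStream
  rw [List.map_map, List.pairwise_map]
  refine List.Pairwise.imp ?_ List.pairwise_lt_range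
  intro a b hab
  show (pvStreamElt mappers a).1 ≥ (pvStreamElt mappers b).1
  simp only [pvStreamElt]
  omega

-- ===== VERDICT (by name: the statement is the Claim_ definition above) =====
theorem find_lifespans_spec : Claim_equal_find_lifespans := by
  intro mappers _ hpre
  unfold Spec_find_lifespans
  have hrun := pvRun_rel (pvStream mappers) PySem.Dict.empty (pvStream_pairwise mappers)
    (by intro p hp; simp [PySem.Dict.empty] at hp)
  rw [pvA_loop mappers hpre, pvB_loop mappers, hrun.1]
  have : ∀ p ∈ (pvRunB (pvStream mappers) PySem.Dict.empty).items,
      (p.1, [(PySem.List.min? p.2 (fun y => y)).getD 0,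
             (PySem.List.max? p.2 (fun y => y)).getD 0]) = pvG p := by
    intro p hp
    exact pvFinal p (hrun.2 p hp).1 (hrun.2 p hp).2
  rw [List.map_congr_left this]
  simp [pvMap]
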